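-- pv_equiv track=rewrite | github.com/Qiskit/qiskit | test/python/quantum_info/operators/test_tensor_product_decomposition.py | blocks_cover_and_disjoint
-- ===== SOURCE A (Python) =====
-- def blocks_cover_and_disjoint(blocks, n_qubits: int) -> bool:
--     """Return True iff `blocks` form a disjoint partition of {0,...,n_qubits-1}."""
--     seen = set()
--     for blk in blocks:
--         for qb in blk:
--             if qb in seen:
--                 return False
--             seen.add(qb)
--     return seen == set(range(n_qubits))
-- ===== SOURCE B (Python) =====
-- def blocks_cover_and_disjoint(blocks, n_qubits: int) -> bool:
--     """Return True iff `blocks` form a disjoint partition of {0,...,n_qubits-1}."""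
--     flat = sorted(q for blk in blocks for q in blk)
--     return len(flat) == len(range(n_qubits)) and all(v == i for i, v in enumerate(flat))
-- ===== Notes on version B (the rewrite author's own statement) =====
-- stated objective: alternative
-- what changed: Replaces A's incremental seen-set with early-return and final set comparison by a sort-based check: flatten all blocks, sort the multiset, and verify it is exactly 0,1,...,n_qubits-1 by a length test plus each sorted element equalling its index; duplicates, gaps and out-of-range qubits all surface as a mismatch.
import Mathlib
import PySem

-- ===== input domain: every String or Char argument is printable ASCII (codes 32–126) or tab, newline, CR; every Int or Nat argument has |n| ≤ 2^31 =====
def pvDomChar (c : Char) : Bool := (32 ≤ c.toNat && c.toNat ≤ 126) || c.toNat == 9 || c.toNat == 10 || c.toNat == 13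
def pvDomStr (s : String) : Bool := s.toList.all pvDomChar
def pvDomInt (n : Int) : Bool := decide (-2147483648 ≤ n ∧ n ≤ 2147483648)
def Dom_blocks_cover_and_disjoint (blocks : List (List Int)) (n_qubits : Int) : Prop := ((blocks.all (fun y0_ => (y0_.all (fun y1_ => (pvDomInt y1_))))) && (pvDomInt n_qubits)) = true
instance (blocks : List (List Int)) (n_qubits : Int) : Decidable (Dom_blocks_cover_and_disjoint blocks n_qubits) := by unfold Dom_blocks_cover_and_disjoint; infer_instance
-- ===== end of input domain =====

-- B replaces A's incremental seen-set scan with early return by sorting the flattened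
-- qubit multiset and checking it is exactly 0..n_qubits-1 (length test + each sorted
-- element equals its index); objective: alternative (sort-based check, no sets).

-- ===== PORT A =====
-- inner 'for qb in blk' loop: none models the early 'return False'
def pvLoopBlk (seen : PySem.Set Int) : List Int → Option (PySem.Set Int)
  | [] => some seen
  | qb :: rest =>
    if PySem.Set.contains seen qb then none
    else pvLoopBlk (PySem.Set.add seen qb) rest

-- outer 'for blk in blocks' loop
def pvLoopBlocks (seen : PySem.Set Int) : List (List Int) → Option (PySem.Set Int)
  | [] => some seen
  | blk :: rest =>
    match pvLoopBlk seen blk with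
    | none => none
    | some s => pvLoopBlocks s rest

def blocks_cover_and_disjoint (blocks : List (List Int)) (n_qubits : Int) : Bool :=
  match pvLoopBlocks PySem.Set.empty blocks with
  | none => false
  | some seen => PySem.Set.equal seen (PySem.Set.ofList (PySem.List.pyRange 0 n_qubits 1))

-- ===== PORT B =====
def blocks_cover_and_disjoint_alt (blocks : List (List Int)) (n_qubits : Int) : Bool :=
  let flat := PySem.List.sorted (blocks.flatMap (fun blk => blk)) (fun x => x) false
  (flat.length == (PySem.List.pyRange 0 n_qubits 1).length)
    && (PySem.List.enumerate flat 0).all (fun p => p.2 == p.1)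

-- ===== PRECONDITION & SPEC =====
def Spec_blocks_cover_and_disjoint (blocks : List (List Int)) (n_qubits : Int) (out : Bool) : Prop := out = blocks_cover_and_disjoint_alt blocks n_qubits
instance (blocks : List (List Int)) (n_qubits : Int) (out : Bool) : Decidable (Spec_blocks_cover_and_disjoint blocks n_qubits out) := by unfold Spec_blocks_cover_and_disjoint; infer_instance

-- ===== CLAIM =====
def Claim_equal_blocks_cover_and_disjoint : Prop := ∀ (blocks : List (List Int)) (n_qubits : Int), Dom_blocks_cover_and_disjoint blocks n_qubits → Spec_blocks_cover_and_disjoint blocks n_qubits (blocks_cover_and_disjoint blocks n_qubits)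

-- ===== LEMMAS AND PROOFS =====

theorem pvLoopBlk_eq (xs : List Int) : ∀ (seen : List Int), seen.Nodup →
    pvLoopBlk seen xs = if (seen ++ xs).Nodup then some (seen ++ xs) else none := by
  induction xs with
  | nil => intro seen h; simp [pvLoopBlk, h]
  | cons qb rest ih =>
    intro seen h
    by_cases hm : qb ∈ seen
    · have hc : PySem.Set.contains seen qb = true := (PySem.Set.contains_iff seen qb).2 hm
      have hnn : ¬ (seen ++ qb :: rest).Nodup := by
        intro hn
        exact (List.disjoint_of_nodup_append hn) hm List.mem_cons_self
      rw [pvLoopBlk, hc]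
      simp [hnn]
    · have hadd : PySem.Set.add seen qb = seen ++ [qb] := PySem.Set.add_of_not_mem hm
      have hnd : (seen ++ [qb]).Nodup := by
        simp [List.nodup_append, h]
        intro a ha hq
        exact hm (hq ▸ ha)
      have hc : PySem.Set.contains seen qb = false := by
        rw [← Bool.not_eq_true, PySem.Set.contains_iff]
        exact hm
      rw [pvLoopBlk, hc]
      simp only [Bool.false_eq_true, if_false]
      rw [hadd, ih _ hnd]
      simp [List.append_assoc]

theorem pvLoopBlocks_eq (blocks : List (List Int)) : ∀ (seen : List Int), seen.Nodup →
    pvLoopBlocks seen blocks =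
      if (seen ++ blocks.flatMap (fun blk => blk)).Nodup then some (seen ++ blocks.flatMap (fun blk => blk)) else none := by
  induction blocks with
  | nil => intro seen h; simp [pvLoopBlocks, h]
  | cons blk rest ih =>
    intro seen h
    rw [pvLoopBlocks, pvLoopBlk_eq blk seen h]
    by_cases hnd : (seen ++ blk).Nodup
    · rw [if_pos hnd]
      simp only []
      rw [ih _ hnd]
      simp [List.append_assoc]
    · have hnn : ¬ (seen ++ (blk :: rest).flatMap (fun b => b)).Nodup := by
        intro hc
        apply hnd
        have hsub : (seen ++ blk).Sublist (seen ++ (blk :: rest).flatMap (fun b => b)) := by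
          apply List.Sublist.append_left
          simp [List.flatMap_cons]
        exact hsub.nodup hc
      rw [if_neg hnd]
      have hnn2 : ¬ (seen ++ (blk ++ rest.flatten)).Nodup := by
        intro hc
        exact hnn (by simpa [List.flatMap_cons, List.flatMap_id', List.append_assoc] using hc)
      simp [hnn2]

theorem alt_true_iff (blocks : List (List Int)) (n_qubits : Int) :
    blocks_cover_and_disjoint_alt blocks n_qubits = true ↔
      PySem.List.sorted (blocks.flatMap (fun blk => blk)) (fun x => x) false
        = PySem.List.pyRange 0 n_qubits 1 := by
  unfold blocks_cover_and_disjoint_alt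
  set fl := PySem.List.sorted (blocks.flatMap (fun blk => blk)) (fun x => x) false with hfl
  set rg := PySem.List.pyRange 0 n_qubits 1 with hrg
  simp only [Bool.and_eq_true, beq_iff_eq, List.all_eq_true]
  constructor
  · rintro ⟨hlen, hall⟩
    apply List.ext_getElem hlen
    intro k hk hk'
    have hmem : ((0 : Int) + k, fl[k]) ∈ PySem.List.enumerate fl 0 :=
      (PySem.List.mem_enumerate_iff fl 0 _).2 ⟨k, hk, rfl⟩
    have h1 := hall _ hmem
    have h2 : rg[k] = 0 + (k : Int) := PySem.List.getElem_pyRange_one 0 n_qubits k hk'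
    rw [h2]
    simpa using h1
  · intro heq
    refine ⟨by rw [heq], ?_⟩
    intro p hp
    rw [heq] at hp
    obtain ⟨k, hk, rfl⟩ := (PySem.List.mem_enumerate_iff rg 0 p).1 hp
    have h2 : rg[k] = 0 + (k : Int) := PySem.List.getElem_pyRange_one 0 n_qubits k hk
    simp [h2]

-- ===== VERDICT =====
theorem blocks_cover_and_disjoint_spec : Claim_equal_blocks_cover_and_disjoint := by
  intro blocks n_qubits _dom
  unfold Spec_blocks_cover_and_disjoint blocks_cover_and_disjoint
  rw [pvLoopBlocks_eq blocks PySem.Set.empty (by simp [PySem.Set.empty])]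
  simp only [PySem.Set.empty, List.nil_append]
  set flat := blocks.flatMap (fun blk => blk) with hflat
  set rg := PySem.List.pyRange 0 n_qubits 1 with hrg
  have hrgnd : rg.Nodup := PySem.List.nodup_pyRange_one 0 n_qubits
  have hrglt : rg.Pairwise (· < ·) := PySem.List.pairwise_lt_pyRange_one 0 n_qubits
  have hkey := alt_true_iff blocks n_qubits
  rw [← hflat, ← hrg] at hkey
  by_cases hnd : flat.Nodup
  · rw [if_pos hnd]
    rw [Bool.eq_iff_iff, PySem.Set.equal_iff,
        PySem.Set.ofList_eq_self_of_nodup rg hrgnd, hkey]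
    constructor
    · intro hmem
      have hperm : flat.Perm rg := by
        rw [List.perm_ext_iff_of_nodup hnd hrgnd]
        intro x
        have := hmem x
        simpa using this
      exact PySem.List.sorted_eq_of_perm_of_pairwise_lt flat rg (fun x => x) hperm.symm hrglt
    · intro hs x
      have hperm : flat.Perm rg :=
        (PySem.List.sorted_perm flat (fun x => x) false).symm.trans (hs ▸ List.Perm.refl _)
      simp [hperm.mem_iff]
  · rw [if_neg hnd]
    have hne : ¬ (PySem.List.sorted flat (fun x => x) false = rg) := by
      intro hs
      have hperm : flat.Perm rg :=
        (PySem.List.sorted_perm flat (fun x => x) false).symm.trans (hs ▸ List.Perm.refl _)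
      exact hnd (hperm.nodup_iff.2 hrgnd)
    rw [Bool.eq_iff_iff, hkey]
    simp [hne]
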